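-- pv_equiv track=rewrite | github.com/erpel-e/verklegtnamskeid | TicTacToe/TicTacToe.py | win_game_x
-- ===== SOURCE A (Python) =====
-- def win_game_x(n, x_board):  # This function check if the player X has won
-- 	countx = 0
-- 	county = 0
-- 	for i in range(n):
-- 		if x_board[i][i] == "X":  # Diagonal
-- 			countx += 1
-- 			if countx == n:
-- 				return True
-- 		if x_board[i][n - (i + 1)] == "X":
-- 			county += 1
-- 			if county == n:
-- 				return True
--
-- 	for i in range(n):
-- 		countz = 0
-- 		for j in range(n):  # Horizontal
-- 			if x_board[i][j] == "X":  # 0,0 0,1 0,2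
-- 				countz += 1
-- 				if countz == n:
-- 					return True
--
-- 	for i in range(n):
-- 		countb = 0  # Vertical check
-- 		for j in range(n):
-- 			if x_board[j][i] == "X":  # 0,0 1,0 2,0
-- 				countb += 1
-- 				if countb == n:
-- 					return True
-- 	else:
-- 		return False
-- ===== SOURCE B (Python) =====
-- def win_game_x(n, x_board):
--     # One sweep over the board, accumulating per-row, per-column and diagonal X counts;
--     # a line is won iff its counter reaches n.
--     if n < 1:
--         return False
--     rows = [0] * n
--     cols = [0] * n
--     diag = 0
--     anti = 0
--     for i in range(n):
--         for j in range(n):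
--             if x_board[i][j] == "X":
--                 rows[i] += 1
--                 cols[j] += 1
--                 if i == j:
--                     diag += 1
--                 if i + j == n - 1:
--                     anti += 1
--     return diag == n or anti == n or n in rows or n in cols
-- ===== Notes on version B (the rewrite author's own statement) =====
-- stated objective: alternative
-- what changed: Replaces A's four separate line scans with early returns by a single sweep over all cells that accumulates per-row, per-column, diagonal and anti-diagonal X counters, deciding the win from the counters afterwards.
-- outside the precondition, e.g. on win_game_x(3, [['X', 'X', 'X'], ['O', 'O'], ['X', 'O', 'X']]): A returns True, B raises IndexError
import Mathlib
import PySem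

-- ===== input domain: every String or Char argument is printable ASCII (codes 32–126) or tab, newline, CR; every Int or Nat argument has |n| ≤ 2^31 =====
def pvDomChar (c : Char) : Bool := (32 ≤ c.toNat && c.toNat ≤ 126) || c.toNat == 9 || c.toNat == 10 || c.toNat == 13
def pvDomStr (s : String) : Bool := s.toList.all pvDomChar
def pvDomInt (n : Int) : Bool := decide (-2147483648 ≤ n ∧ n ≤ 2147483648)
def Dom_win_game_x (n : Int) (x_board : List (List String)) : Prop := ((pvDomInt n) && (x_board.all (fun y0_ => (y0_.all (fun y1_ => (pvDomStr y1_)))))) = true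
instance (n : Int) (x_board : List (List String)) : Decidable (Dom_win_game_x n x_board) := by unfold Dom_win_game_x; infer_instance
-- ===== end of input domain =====

-- B replaces A's four separate line scans (with counters and early returns) by a single sweep
-- over all cells accumulating per-row/per-column/diagonal counters, checked afterwards
-- (alternative decomposition; same asymptotic cost).


-- ===== PORT A =====
-- x_board[i][j] (shared by both ports): pyGetD with defaults; exact on Pre_ (all indices in range there).
def pvCell (xb : List (List String)) (i j : Int) : String :=
  PySem.List.pyGetD (PySem.List.pyGetD xb i []) j ""

-- first loop: diagonal/anti-diagonal counters with early return (some true = "return True")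
def pvDiagLoop (n : Int) (xb : List (List String)) : List Int → Int → Int → Option Bool
  | [], _, _ => none
  | i :: rest, cx, cy =>
    if pvCell xb i i == "X" then
      if cx + 1 = n then some true
      else
        if pvCell xb i (n - (i + 1)) == "X" then
          if cy + 1 = n then some true else pvDiagLoop n xb rest (cx + 1) (cy + 1)
        else pvDiagLoop n xb rest (cx + 1) cy
    else
      if pvCell xb i (n - (i + 1)) == "X" then
        if cy + 1 = n then some true else pvDiagLoop n xb rest cx (cy + 1)
      else pvDiagLoop n xb rest cx cy

-- second loop, inner j-loop over row i
def pvRowInner (n : Int) (xb : List (List String)) (i : Int) : List Int → Int → Option Bool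
  | [], _ => none
  | j :: rest, cz =>
    if pvCell xb i j == "X" then
      if cz + 1 = n then some true else pvRowInner n xb i rest (cz + 1)
    else pvRowInner n xb i rest cz

def pvRowLoop (n : Int) (xb : List (List String)) : List Int → Option Bool
  | [] => none
  | i :: rest =>
    match pvRowInner n xb i (PySem.List.pyRange 0 n 1) 0 with
    | some b => some b
    | none => pvRowLoop n xb rest

-- third loop, inner j-loop over column i
def pvColInner (n : Int) (xb : List (List String)) (i : Int) : List Int → Int → Option Bool
  | [], _ => none
  | j :: rest, cb =>
    if pvCell xb j i == "X" then
      if cb + 1 = n then some true else pvColInner n xb i rest (cb + 1)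
    else pvColInner n xb i rest cb

def pvColLoop (n : Int) (xb : List (List String)) : List Int → Option Bool
  | [] => none
  | i :: rest =>
    match pvColInner n xb i (PySem.List.pyRange 0 n 1) 0 with
    | some b => some b
    | none => pvColLoop n xb rest

def win_game_x (n : Int) (x_board : List (List String)) : Bool :=
  match pvDiagLoop n x_board (PySem.List.pyRange 0 n 1) 0 0 with
  | some b => b
  | none =>
    match pvRowLoop n x_board (PySem.List.pyRange 0 n 1) with
    | some b => b
    | none =>
      match pvColLoop n x_board (PySem.List.pyRange 0 n 1) with
      | some b => b
      | none => false

-- ===== PORT B =====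
-- rows[i] += 1 (index always in 0..n-1 where it is used)
def pvBump (c : List Int) (j : Int) : List Int :=
  c.set j.toNat (c.getD j.toNat 0 + 1)

-- one cell of B's sweep: state = (rows, cols, diag, anti)
def pvSweepCell (n : Int) (xb : List (List String)) (i j : Int)
    (st : List Int × List Int × Int × Int) : List Int × List Int × Int × Int :=
  if pvCell xb i j == "X" then
    (pvBump st.1 i, pvBump st.2.1 j,
     if i == j then st.2.2.1 + 1 else st.2.2.1,
     if i + j == n - 1 then st.2.2.2 + 1 else st.2.2.2)
  else st

def pvInnerB (n : Int) (xb : List (List String)) (i : Int) (js : List Int)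
    (st : List Int × List Int × Int × Int) : List Int × List Int × Int × Int :=
  js.foldl (fun st j => pvSweepCell n xb i j st) st

def pvOuterB (n : Int) (xb : List (List String)) (is : List Int)
    (st : List Int × List Int × Int × Int) : List Int × List Int × Int × Int :=
  is.foldl (fun st i => pvInnerB n xb i (PySem.List.pyRange 0 n 1) st) st

def win_game_x_alt (n : Int) (x_board : List (List String)) : Bool :=
  if n < 1 then false
  else
    let st := pvOuterB n x_board (PySem.List.pyRange 0 n 1)
      (List.replicate n.toNat 0, List.replicate n.toNat 0, 0, 0)
    st.2.2.1 == n || st.2.2.2 == n || st.1.contains n || st.2.1.contains n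

-- ===== PRECONDITION & SPEC =====
-- Pre_ excludes jagged/short boards, where Python A raises IndexError (or, on a few jagged
-- boards it happens to accept via an early return, B raises; see the cite in the claim).
def Pre_win_game_x (n : Int) (x_board : List (List String)) : Prop :=
  n < 1 ∨ (n ≤ x_board.length ∧ ∀ row ∈ x_board.take n.toNat, n ≤ (row.length : Int))
instance (n : Int) (x_board : List (List String)) : Decidable (Pre_win_game_x n x_board) := by unfold Pre_win_game_x; infer_instance

def pvWitness_win_game_x : Int × List (List String) := (2, [["X", "O"], ["O", "X"]])

def Spec_win_game_x (n : Int) (x_board : List (List String)) (out : Bool) : Prop := out = win_game_x_alt n x_board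
instance (n : Int) (x_board : List (List String)) (out : Bool) : Decidable (Spec_win_game_x n x_board out) := by unfold Spec_win_game_x; infer_instance

-- ===== CLAIM (what is proved, stated in full; the proofs are below) =====
def Claim_equal_win_game_x : Prop := ∀ (n : Int) (x_board : List (List String)), Dom_win_game_x n x_board → Pre_win_game_x n x_board → Spec_win_game_x n x_board (win_game_x n x_board)

-- ===== LEMMAS AND PROOFS =====


theorem pvDiagLoop_eq (n : Int) (xb : List (List String)) (l : List Int) (cx cy : Int)
    (hx : cx < n) (hy : cy < n) :
    pvDiagLoop n xb l cx cy =
      if n ≤ cx + l.countP (fun i => pvCell xb i i == "X")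
          ∨ n ≤ cy + l.countP (fun i => pvCell xb i (n - (i + 1)) == "X")
        then some true else none := by
  induction l generalizing cx cy with
  | nil => simp [pvDiagLoop]; omega
  | cons i rest ih =>
    have hd0 : (0:Int) ≤ rest.countP (fun i => pvCell xb i i == "X") := by positivity
    have ha0 : (0:Int) ≤ rest.countP (fun i => pvCell xb i (n - (i + 1)) == "X") := by positivity
    simp only [pvDiagLoop, List.countP_cons]
    by_cases hd : pvCell xb i i == "X" <;> by_cases ha : pvCell xb i (n - (i + 1)) == "X" <;>
      simp only [hd, ha, Bool.not_eq_true] at * <;>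
      simp only [if_true, Bool.false_eq_true, if_false, Nat.add_zero]
    · by_cases hcx : cx + 1 = n
      · rw [if_pos hcx, if_pos]; left; push_cast; omega
      · rw [if_neg hcx]
        by_cases hcy : cy + 1 = n
        · rw [if_pos hcy, if_pos]; right; push_cast; omega
        · rw [if_neg hcy, ih _ _ (by omega) (by omega)]
          split_ifs <;> first | rfl | omega
    · by_cases hcx : cx + 1 = n
      · rw [if_pos hcx, if_pos]; left; push_cast; omega
      · rw [if_neg hcx, ih _ _ (by omega) hy]
        split_ifs <;> first | rfl | omega
    · by_cases hcy : cy + 1 = n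
      · rw [if_pos hcy, if_pos]; right; push_cast; omega
      · rw [if_neg hcy, ih _ _ hx (by omega)]
        split_ifs <;> first | rfl | omega
    · exact ih _ _ hx hy

theorem pvRowInner_eq (n : Int) (xb : List (List String)) (i : Int) (l : List Int) (cz : Int)
    (hz : cz < n) :
    pvRowInner n xb i l cz =
      if n ≤ cz + l.countP (fun j => pvCell xb i j == "X") then some true else none := by
  induction l generalizing cz with
  | nil => simp [pvRowInner]; omega
  | cons j rest ih =>
    simp only [pvRowInner, List.countP_cons]
    by_cases h : pvCell xb i j == "X" <;>
      simp only [h, Bool.not_eq_true] at * <;>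
      simp only [if_true, Bool.false_eq_true, if_false, Nat.add_zero]
    · by_cases hcz : cz + 1 = n
      · rw [if_pos hcz, if_pos]; omega
      · rw [if_neg hcz, ih _ (by omega)]
        split_ifs <;> first | rfl | omega
    · exact ih _ hz

theorem pvColInner_eq (n : Int) (xb : List (List String)) (i : Int) (l : List Int) (cb : Int)
    (hb : cb < n) :
    pvColInner n xb i l cb =
      if n ≤ cb + l.countP (fun j => pvCell xb j i == "X") then some true else none := by
  induction l generalizing cb with
  | nil => simp [pvColInner]; omega
  | cons j rest ih =>
    simp only [pvColInner, List.countP_cons]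
    by_cases h : pvCell xb j i == "X" <;>
      simp only [h, Bool.not_eq_true] at * <;>
      simp only [if_true, Bool.false_eq_true, if_false, Nat.add_zero]
    · by_cases hcb : cb + 1 = n
      · rw [if_pos hcb, if_pos]; omega
      · rw [if_neg hcb, ih _ (by omega)]
        split_ifs <;> first | rfl | omega
    · exact ih _ hb

theorem pvRowLoop_eq (n : Int) (xb : List (List String)) (l : List Int) (hn : 0 < n) :
    pvRowLoop n xb l =
      if ∃ i ∈ l, n ≤ ((PySem.List.pyRange 0 n 1).countP (fun j => pvCell xb i j == "X") : Int)
        then some true else none := by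
  induction l with
  | nil => simp [pvRowLoop]
  | cons i rest ih =>
    simp only [pvRowLoop]
    rw [pvRowInner_eq n xb i _ 0 hn]
    simp only [zero_add]
    by_cases h : n ≤ ((PySem.List.pyRange 0 n 1).countP (fun j => pvCell xb i j == "X") : Int)
    · rw [if_pos h, if_pos ⟨i, by simp, h⟩]
    · rw [if_neg h]
      rw [show (match (none : Option Bool) with
            | some b => some b
            | none => pvRowLoop n xb rest) = pvRowLoop n xb rest from rfl, ih]
      refine if_congr ?_ rfl rfl
      constructor
      · rintro ⟨a, ha, hle⟩; exact ⟨a, List.mem_cons_of_mem _ ha, hle⟩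
      · rintro ⟨a, ha, hle⟩
        rcases List.mem_cons.mp ha with rfl | ha2
        · exact absurd hle h
        · exact ⟨a, ha2, hle⟩

theorem pvColLoop_eq (n : Int) (xb : List (List String)) (l : List Int) (hn : 0 < n) :
    pvColLoop n xb l =
      if ∃ i ∈ l, n ≤ ((PySem.List.pyRange 0 n 1).countP (fun j => pvCell xb j i == "X") : Int)
        then some true else none := by
  induction l with
  | nil => simp [pvColLoop]
  | cons i rest ih =>
    simp only [pvColLoop]
    rw [pvColInner_eq n xb i _ 0 hn]
    simp only [zero_add]
    by_cases h : n ≤ ((PySem.List.pyRange 0 n 1).countP (fun j => pvCell xb j i == "X") : Int)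
    · rw [if_pos h, if_pos ⟨i, by simp, h⟩]
    · rw [if_neg h]
      rw [show (match (none : Option Bool) with
            | some b => some b
            | none => pvColLoop n xb rest) = pvColLoop n xb rest from rfl, ih]
      refine if_congr ?_ rfl rfl
      constructor
      · rintro ⟨a, ha, hle⟩; exact ⟨a, List.mem_cons_of_mem _ ha, hle⟩
      · rintro ⟨a, ha, hle⟩
        rcases List.mem_cons.mp ha with rfl | ha2
        · exact absurd hle h
        · exact ⟨a, ha2, hle⟩

-- n ≤ count over range(n) says: every element of the range satisfies p
theorem pvCount_full (n : Int) (hn : 0 < n) (p : Int → Bool) :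
    (n ≤ ((PySem.List.pyRange 0 n 1).countP p : Int)) ↔
      ∀ i ∈ PySem.List.pyRange 0 n 1, p i := by
  have hlen : (PySem.List.pyRange 0 n 1).length = n.toNat := by
    simp [PySem.List.length_pyRange_one]
  have hle := List.countP_le_length (p := p) (l := PySem.List.pyRange 0 n 1)
  rw [← List.countP_eq_length]
  omega

theorem win_game_x_true_iff (n : Int) (xb : List (List String)) (hn : 0 < n) :
    win_game_x n xb = true ↔
      ((∀ i ∈ PySem.List.pyRange 0 n 1, pvCell xb i i == "X") ∨
       (∀ i ∈ PySem.List.pyRange 0 n 1, pvCell xb i (n - (i + 1)) == "X")) ∨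
      (∃ i ∈ PySem.List.pyRange 0 n 1, ∀ j ∈ PySem.List.pyRange 0 n 1, pvCell xb i j == "X") ∨
      (∃ i ∈ PySem.List.pyRange 0 n 1, ∀ j ∈ PySem.List.pyRange 0 n 1, pvCell xb j i == "X") := by
  unfold win_game_x
  rw [pvDiagLoop_eq n xb _ 0 0 hn hn, pvRowLoop_eq n xb _ hn, pvColLoop_eq n xb _ hn]
  simp only [zero_add, pvCount_full n hn]
  by_cases h1 : (∀ i ∈ PySem.List.pyRange 0 n 1, pvCell xb i i == "X") ∨
      (∀ i ∈ PySem.List.pyRange 0 n 1, pvCell xb i (n - (i + 1)) == "X")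
  · rw [if_pos h1]
    exact iff_of_true rfl (Or.inl h1)
  · rw [if_neg h1]
    by_cases h2 : ∃ i ∈ PySem.List.pyRange 0 n 1, ∀ j ∈ PySem.List.pyRange 0 n 1,
        pvCell xb i j == "X"
    · rw [if_pos h2]
      exact iff_of_true rfl (Or.inr (Or.inl h2))
    · rw [if_neg h2]
      by_cases h3 : ∃ i ∈ PySem.List.pyRange 0 n 1, ∀ j ∈ PySem.List.pyRange 0 n 1,
          pvCell xb j i == "X"
      · rw [if_pos h3]
        exact iff_of_true rfl (Or.inr (Or.inr h3))
      · rw [if_neg h3]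
        exact iff_of_false Bool.false_ne_true (fun h => h.elim h1 (fun hx => hx.elim h2 h3))

-- ===== B-side lemmas =====

theorem pvBump_getD (c : List Int) (j : Int) (m : Nat) :
    (pvBump c j).getD m 0 = c.getD m 0 + (if m = j.toNat ∧ m < c.length then 1 else 0) := by
  unfold pvBump
  rcases Nat.lt_or_ge m c.length with hm | hm
  · rw [List.getD_eq_getElem?_getD, List.getElem?_set_of_lt _ _ hm]
    by_cases he : j.toNat = m
    · subst he
      simp [hm, List.getD_eq_getElem?_getD]
    · have he2 : ¬ (m = j.toNat ∧ m < c.length) := fun h => he h.1.symm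
      simp [he, he2, List.getD_eq_getElem?_getD]
  · have h1 : (c.set j.toNat (c.getD j.toNat 0 + 1)).getD m 0 = 0 :=
      List.getD_eq_default _ _ (by simpa using hm)
    have h2 : c.getD m 0 = 0 := List.getD_eq_default _ _ hm
    have h3 : ¬ (m = j.toNat ∧ m < c.length) := by omega
    rw [h1, h2, if_neg h3]
    simp

theorem pvSweep_len (n : Int) (xb : List (List String)) (i j : Int)
    (st : List Int × List Int × Int × Int) :
    (pvSweepCell n xb i j st).1.length = st.1.length ∧
    (pvSweepCell n xb i j st).2.1.length = st.2.1.length := by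
  unfold pvSweepCell; split <;> simp [pvBump]

theorem pvInnerB_len (n : Int) (xb : List (List String)) (i : Int) (js : List Int)
    (st : List Int × List Int × Int × Int) :
    (pvInnerB n xb i js st).1.length = st.1.length ∧
    (pvInnerB n xb i js st).2.1.length = st.2.1.length := by
  induction js generalizing st with
  | nil => exact ⟨rfl, rfl⟩
  | cons j rest ih =>
    simp only [pvInnerB, List.foldl_cons] at *
    rcases ih (pvSweepCell n xb i j st) with ⟨h1, h2⟩
    rcases pvSweep_len n xb i j st with ⟨g1, g2⟩
    exact ⟨h1.trans g1, h2.trans g2⟩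

theorem pvOuterB_len (n : Int) (xb : List (List String)) (l : List Int)
    (st : List Int × List Int × Int × Int) :
    (pvOuterB n xb l st).1.length = st.1.length ∧
    (pvOuterB n xb l st).2.1.length = st.2.1.length := by
  induction l generalizing st with
  | nil => exact ⟨rfl, rfl⟩
  | cons i rest ih =>
    simp only [pvOuterB, List.foldl_cons] at *
    rcases ih (pvInnerB n xb i (PySem.List.pyRange 0 n 1) st) with ⟨h1, h2⟩
    rcases pvInnerB_len n xb i (PySem.List.pyRange 0 n 1) st with ⟨g1, g2⟩
    exact ⟨h1.trans g1, h2.trans g2⟩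

theorem pvInnerB_diag (n : Int) (xb : List (List String)) (i : Int) (js : List Int)
    (st : List Int × List Int × Int × Int) :
    (pvInnerB n xb i js st).2.2.1 =
      st.2.2.1 + (js.countP (fun j => pvCell xb i j == "X" && i == j) : Int) := by
  induction js generalizing st with
  | nil => simp [pvInnerB]
  | cons j rest ih =>
    simp only [pvInnerB, List.foldl_cons] at *
    rw [ih, List.countP_cons]
    unfold pvSweepCell
    by_cases hc : pvCell xb i j == "X" <;> by_cases hij : (i == j : Bool) = true <;>
      simp [hc, hij] <;> push_cast <;> ring

theorem pvInnerB_anti (n : Int) (xb : List (List String)) (i : Int) (js : List Int)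
    (st : List Int × List Int × Int × Int) :
    (pvInnerB n xb i js st).2.2.2 =
      st.2.2.2 + (js.countP (fun j => pvCell xb i j == "X" && i + j == n - 1) : Int) := by
  induction js generalizing st with
  | nil => simp [pvInnerB]
  | cons j rest ih =>
    simp only [pvInnerB, List.foldl_cons] at *
    rw [ih, List.countP_cons]
    unfold pvSweepCell
    by_cases hc : pvCell xb i j == "X" <;> by_cases ha : (i + j == n - 1 : Bool) = true <;>
      simp [hc, ha] <;> push_cast <;> ring

theorem pvInnerB_rows (n : Int) (xb : List (List String)) (i : Int) (js : List Int)
    (st : List Int × List Int × Int × Int) (m : Nat) :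
    (pvInnerB n xb i js st).1.getD m 0 =
      st.1.getD m 0 +
        (if m = i.toNat ∧ m < st.1.length
          then (js.countP (fun j => pvCell xb i j == "X") : Int) else 0) := by
  induction js generalizing st with
  | nil => simp [pvInnerB]
  | cons j rest ih =>
    simp only [pvInnerB, List.foldl_cons] at *
    rw [ih, List.countP_cons, (pvSweep_len n xb i j st).1]
    unfold pvSweepCell
    by_cases hc : pvCell xb i j == "X"
    · rw [if_pos hc]
      show (pvBump st.1 i).getD m 0 + _ = _
      rw [pvBump_getD]
      by_cases hm : m = i.toNat ∧ m < st.1.length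
      · have hc' : pvCell xb i j = "X" := by simpa using hc
        have hlt : i.toNat < st.1.length := hm.1 ▸ hm.2
        simp [hm, hlt, hc']
        push_cast; ring
      · simp [hm]
    · rw [if_neg hc]
      simp [hc]

theorem pvInnerB_cols (n : Int) (xb : List (List String)) (i : Int) (js : List Int)
    (st : List Int × List Int × Int × Int)
    (hjs : ∀ j ∈ js, 0 ≤ j ∧ j.toNat < st.2.1.length) (m : Nat) :
    (pvInnerB n xb i js st).2.1.getD m 0 =
      st.2.1.getD m 0 + (js.countP (fun j => pvCell xb i j == "X" && j.toNat == m) : Int) := by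
  induction js generalizing st with
  | nil => simp [pvInnerB]
  | cons j rest ih =>
    obtain ⟨hj0, hjlen⟩ := hjs j (List.mem_cons_self ..)
    have hrest : ∀ x ∈ rest, 0 ≤ x ∧ x.toNat < (pvSweepCell n xb i j st).2.1.length := by
      intro x hx
      rw [(pvSweep_len n xb i j st).2]
      exact hjs x (List.mem_cons_of_mem _ hx)
    simp only [pvInnerB, List.foldl_cons] at *
    rw [ih _ hrest, List.countP_cons]
    unfold pvSweepCell
    by_cases hc : pvCell xb i j == "X"
    · rw [if_pos hc]
      show (pvBump st.2.1 j).getD m 0 + _ = _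
      rw [pvBump_getD]
      by_cases hjm : j.toNat = m
      · have hmj : m = j.toNat ∧ m < st.2.1.length := ⟨hjm.symm, hjm ▸ hjlen⟩
        rw [if_pos hmj]
        have hb : (pvCell xb i j == "X" && j.toNat == m) = true := by simp [hc, hjm]
        rw [hb]
        simp
        omega
      · have : ¬ (m = j.toNat ∧ m < st.2.1.length) := fun h => hjm h.1.symm
        simp [this, hc, hjm]
    · rw [if_neg hc]
      simp [hc]


theorem pvCountP_target (l : List Int) (hnd : l.Nodup) (t : Int) (q : Int → Bool)
    (p : Int → Bool) (hp : ∀ j, p j = (q j && j == t)) :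
    (l.countP p : Int) = if t ∈ l ∧ q t then 1 else 0 := by
  induction l with
  | nil => simp
  | cons a rest ih =>
    rw [List.countP_cons]
    rcases List.nodup_cons.mp hnd with ⟨hna, hnr⟩
    by_cases hat : a = t
    · subst hat
      have hnt : ¬ (a ∈ rest ∧ q a) := fun h => hna h.1
      rw [hp a]
      have := ih hnr
      rw [if_neg hnt] at this
      by_cases hq : q a = true
      · simp [hq, this]
      · simp [hq, this]
    · have hmem : (t ∈ a :: rest ∧ q t) ↔ (t ∈ rest ∧ q t) := by
        constructor
        · rintro ⟨h1, h2⟩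
          rcases List.mem_cons.mp h1 with h | h
          · exact absurd h.symm hat
          · exact ⟨h, h2⟩
        · rintro ⟨h1, h2⟩; exact ⟨List.mem_cons_of_mem _ h1, h2⟩
      rw [if_congr hmem rfl rfl, ← ih hnr, hp a]
      have : (a == t) = false := by simp [hat]
      simp [this]

theorem pvOuterB_diag (n : Int) (xb : List (List String)) (hn : 0 < n) (l : List Int)
    (st : List Int × List Int × Int × Int) (hl : ∀ i ∈ l, 0 ≤ i ∧ i < n) :
    (pvOuterB n xb l st).2.2.1 =
      st.2.2.1 + (l.countP (fun i => pvCell xb i i == "X") : Int) := by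
  induction l generalizing st with
  | nil => simp [pvOuterB]
  | cons i rest ih =>
    obtain ⟨hi0, hin⟩ := hl i (List.mem_cons_self ..)
    have hrest : ∀ x ∈ rest, 0 ≤ x ∧ x < n := fun x hx => hl x (List.mem_cons_of_mem _ hx)
    simp only [pvOuterB, List.foldl_cons] at *
    rw [ih _ hrest, pvInnerB_diag, List.countP_cons]
    have hcnt := pvCountP_target (PySem.List.pyRange 0 n 1) (PySem.List.nodup_pyRange_one 0 n) i
      (fun j => pvCell xb i j == "X") (fun j => pvCell xb i j == "X" && i == j)
      (fun j => by
        show (pvCell xb i j == "X" && (i == j)) = ((pvCell xb i j == "X") && (j == i))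
        by_cases h : i = j
        · subst h; rfl
        · have h1 : (i == j) = false := by simpa using h
          have h2 : (j == i) = false := by simpa using Ne.symm h
          rw [h1, h2])
    rw [hcnt]
    have hmem : i ∈ PySem.List.pyRange 0 n 1 := PySem.List.mem_pyRange_one.mpr ⟨hi0, hin⟩
    by_cases hq : pvCell xb i i == "X" <;> simp [hq, hmem] <;> push_cast <;> ring

theorem pvOuterB_anti (n : Int) (xb : List (List String)) (hn : 0 < n) (l : List Int)
    (st : List Int × List Int × Int × Int) (hl : ∀ i ∈ l, 0 ≤ i ∧ i < n) :
    (pvOuterB n xb l st).2.2.2 =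
      st.2.2.2 + (l.countP (fun i => pvCell xb i (n - 1 - i) == "X") : Int) := by
  induction l generalizing st with
  | nil => simp [pvOuterB]
  | cons i rest ih =>
    obtain ⟨hi0, hin⟩ := hl i (List.mem_cons_self ..)
    have hrest : ∀ x ∈ rest, 0 ≤ x ∧ x < n := fun x hx => hl x (List.mem_cons_of_mem _ hx)
    simp only [pvOuterB, List.foldl_cons] at *
    rw [ih _ hrest, pvInnerB_anti, List.countP_cons]
    have hcnt := pvCountP_target (PySem.List.pyRange 0 n 1) (PySem.List.nodup_pyRange_one 0 n)
      (n - 1 - i) (fun j => pvCell xb i j == "X")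
      (fun j => pvCell xb i j == "X" && i + j == n - 1)
      (fun j => by
        show (pvCell xb i j == "X" && (i + j == n - 1)) = ((pvCell xb i j == "X") && (j == n - 1 - i))
        by_cases h : i + j = n - 1
        · have e1 : (i + j == n - 1) = true := by simpa using h
          have e2 : (j == n - 1 - i) = true := by simpa using (by omega : j = n - 1 - i)
          rw [e1, e2]
        · have e1 : (i + j == n - 1) = false := by simpa using h
          have e2 : (j == n - 1 - i) = false := by simpa using (by omega : j ≠ n - 1 - i)
          rw [e1, e2])
    rw [hcnt]
    have hmem : n - 1 - i ∈ PySem.List.pyRange 0 n 1 :=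
      PySem.List.mem_pyRange_one.mpr ⟨by omega, by omega⟩
    by_cases hq : pvCell xb i (n - 1 - i) == "X" <;> simp [hq, hmem] <;> push_cast <;> ring

theorem pvOuterB_rows (n : Int) (xb : List (List String)) (l : List Int)
    (hnd : l.Nodup) (h0 : ∀ i ∈ l, 0 ≤ i)
    (st : List Int × List Int × Int × Int) (m : Nat) (hm : m < st.1.length) :
    (pvOuterB n xb l st).1.getD m 0 =
      st.1.getD m 0 +
        (if (m : Int) ∈ l
          then ((PySem.List.pyRange 0 n 1).countP (fun j => pvCell xb (m : Int) j == "X") : Int)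
          else 0) := by
  induction l generalizing st with
  | nil => simp [pvOuterB]
  | cons i rest ih =>
    rcases List.nodup_cons.mp hnd with ⟨hna, hnr⟩
    have hi0 := (h0 i (List.mem_cons_self ..))
    have h0r : ∀ x ∈ rest, 0 ≤ x := fun x hx => h0 x (List.mem_cons_of_mem _ hx)
    simp only [pvOuterB, List.foldl_cons] at *
    rw [ih hnr h0r _ (by rw [(pvInnerB_len n xb i (PySem.List.pyRange 0 n 1) st).1]; exact hm),
      pvInnerB_rows]
    by_cases he : m = i.toNat
    · have hieq : (m : Int) = i := by omega
      have hnotr : ¬ ((m : Int) ∈ rest) := by rw [hieq]; exact hna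
      have hmemc : (m : Int) ∈ i :: rest := by rw [hieq]; exact List.mem_cons_self ..
      rw [if_pos ⟨he, hm⟩, if_neg hnotr, if_pos hmemc, hieq]
      ring
    · have hcond : ¬ (m = i.toNat ∧ m < st.1.length) := fun h => he h.1
      have hne : (m : Int) ≠ i := by omega
      have hiff : ((m : Int) ∈ i :: rest) ↔ ((m : Int) ∈ rest) := by
        constructor
        · intro h; rcases List.mem_cons.mp h with h | h
          · exact absurd h hne
          · exact h
        · exact List.mem_cons_of_mem _
      rw [if_neg hcond, if_congr hiff rfl rfl]
      ring

theorem pvOuterB_cols (n : Int) (xb : List (List String)) (hn : 0 < n) (l : List Int)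
    (st : List Int × List Int × Int × Int)
    (hlen : st.2.1.length = n.toNat) (m : Nat) (hm : m < n.toNat) :
    (pvOuterB n xb l st).2.1.getD m 0 =
      st.2.1.getD m 0 + (l.countP (fun i => pvCell xb i (m : Int) == "X") : Int) := by
  induction l generalizing st with
  | nil => simp [pvOuterB]
  | cons i rest ih =>
    have hjs : ∀ j ∈ PySem.List.pyRange 0 n 1, 0 ≤ j ∧ j.toNat < st.2.1.length := by
      intro j hj
      rcases PySem.List.mem_pyRange_one.mp hj with ⟨h1, h2⟩
      exact ⟨h1, by rw [hlen]; omega⟩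
    have hlen2 : (pvInnerB n xb i (PySem.List.pyRange 0 n 1) st).2.1.length = n.toNat := by
      rw [(pvInnerB_len n xb i (PySem.List.pyRange 0 n 1) st).2]; exact hlen
    simp only [pvOuterB, List.foldl_cons] at *
    rw [ih _ hlen2, pvInnerB_cols n xb i _ st hjs m, List.countP_cons]
    have hpred : (PySem.List.pyRange 0 n 1).countP (fun j => pvCell xb i j == "X" && j.toNat == m)
        = (PySem.List.pyRange 0 n 1).countP (fun j => pvCell xb i j == "X" && j == (m : Int)) := by
      apply List.countP_congr
      intro j hj
      rcases PySem.List.mem_pyRange_one.mp hj with ⟨h1, _⟩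
      have : ((j.toNat == m) : Bool) = (j == (m : Int)) := by
        by_cases h : j = (m : Int)
        · have : j.toNat = m := by omega
          simp [h, this]
        · have : j.toNat ≠ m := by omega
          simp [h, this]
      rw [this]
    rw [hpred, pvCountP_target (PySem.List.pyRange 0 n 1) (PySem.List.nodup_pyRange_one 0 n) (m : Int)
      (fun j => pvCell xb i j == "X") _ (fun j => rfl)]
    have hmem : (m : Int) ∈ PySem.List.pyRange 0 n 1 :=
      PySem.List.mem_pyRange_one.mpr ⟨by omega, by omega⟩
    by_cases hq : pvCell xb i (m : Int) == "X" <;> simp [hq, hmem] <;> push_cast <;> ring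

theorem pvContains_iff (c : List Int) (v : Int) :
    c.contains v = true ↔ ∃ m : Nat, m < c.length ∧ c.getD m 0 = v := by
  rw [List.contains_iff_mem, List.mem_iff_getElem]
  constructor
  · rintro ⟨m, h, hv⟩
    exact ⟨m, h, by rw [List.getD_eq_getElem c 0 h]; exact hv⟩
  · rintro ⟨m, h, hv⟩
    exact ⟨m, h, by rw [← List.getD_eq_getElem c 0 h]; exact hv⟩


theorem pvRep_getD (k m : Nat) : (List.replicate k (0:Int)).getD m 0 = 0 := by
  rcases Nat.lt_or_ge m k with h | h
  · rw [List.getD_eq_getElem _ _ (by simpa using h), List.getElem_replicate]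
  · rw [List.getD_eq_default _ _ (by simpa using h)]

set_option maxHeartbeats 1600000 in
theorem win_game_x_alt_true_iff (n : Int) (xb : List (List String)) (hn : 0 < n) :
    win_game_x_alt n xb = true ↔
      ((∀ i ∈ PySem.List.pyRange 0 n 1, pvCell xb i i == "X") ∨
       (∀ i ∈ PySem.List.pyRange 0 n 1, pvCell xb i (n - 1 - i) == "X")) ∨
      (∃ i ∈ PySem.List.pyRange 0 n 1, ∀ j ∈ PySem.List.pyRange 0 n 1, pvCell xb i j == "X") ∨
      (∃ i ∈ PySem.List.pyRange 0 n 1, ∀ j ∈ PySem.List.pyRange 0 n 1, pvCell xb j i == "X") := by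
  have hrlen : (PySem.List.pyRange 0 n 1).length = n.toNat := by
    simp [PySem.List.length_pyRange_one]
  have hrmem : ∀ i : Int, i ∈ PySem.List.pyRange 0 n 1 ↔ 0 ≤ i ∧ i < n :=
    fun i => PySem.List.mem_pyRange_one
  have hl : ∀ i ∈ PySem.List.pyRange 0 n 1, 0 ≤ i ∧ i < n := fun i hi => (hrmem i).mp hi
  have hcnt_le : ∀ p : Int → Bool, (PySem.List.pyRange 0 n 1).countP p ≤ n.toNat :=
    fun p => hrlen ▸ List.countP_le_length
  have hfull : ∀ p : Int → Bool,
      (((PySem.List.pyRange 0 n 1).countP p : Int) = n ↔ ∀ i ∈ PySem.List.pyRange 0 n 1, p i) := by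
    intro p
    constructor
    · intro h; exact (pvCount_full n hn p).mp (by omega)
    · intro h
      have h1 := (pvCount_full n hn p).mpr h
      have h2 := hcnt_le p
      omega
  have hst :
      win_game_x_alt n xb =
        ((pvOuterB n xb (PySem.List.pyRange 0 n 1)
            (List.replicate n.toNat 0, List.replicate n.toNat 0, 0, 0)).2.2.1 == n ||
         (pvOuterB n xb (PySem.List.pyRange 0 n 1)
            (List.replicate n.toNat 0, List.replicate n.toNat 0, 0, 0)).2.2.2 == n ||
         (pvOuterB n xb (PySem.List.pyRange 0 n 1)
            (List.replicate n.toNat 0, List.replicate n.toNat 0, 0, 0)).1.contains n ||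
         (pvOuterB n xb (PySem.List.pyRange 0 n 1)
            (List.replicate n.toNat 0, List.replicate n.toNat 0, 0, 0)).2.1.contains n) := by
    unfold win_game_x_alt
    rw [if_neg (by omega : ¬ n < 1)]
  rw [hst]
  have hdiag : (pvOuterB n xb (PySem.List.pyRange 0 n 1)
      (List.replicate n.toNat 0, List.replicate n.toNat 0, 0, 0)).2.2.1 =
      ((PySem.List.pyRange 0 n 1).countP (fun i => pvCell xb i i == "X") : Int) := by
    rw [pvOuterB_diag n xb hn _ _ hl]
    show (0:Int) + _ = _
    ring
  have hanti : (pvOuterB n xb (PySem.List.pyRange 0 n 1)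
      (List.replicate n.toNat 0, List.replicate n.toNat 0, 0, 0)).2.2.2 =
      ((PySem.List.pyRange 0 n 1).countP (fun i => pvCell xb i (n - 1 - i) == "X") : Int) := by
    rw [pvOuterB_anti n xb hn _ _ hl]
    show (0:Int) + _ = _
    ring
  have hlen1 : (pvOuterB n xb (PySem.List.pyRange 0 n 1)
      (List.replicate n.toNat 0, List.replicate n.toNat 0, 0, 0)).1.length = n.toNat := by
    rw [(pvOuterB_len n xb _ _).1]
    simp
  have hlen2 : (pvOuterB n xb (PySem.List.pyRange 0 n 1)
      (List.replicate n.toNat 0, List.replicate n.toNat 0, 0, 0)).2.1.length = n.toNat := by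
    rw [(pvOuterB_len n xb _ _).2]
    simp
  have hrows : ∀ m : Nat, m < n.toNat →
      (pvOuterB n xb (PySem.List.pyRange 0 n 1)
        (List.replicate n.toNat 0, List.replicate n.toNat 0, 0, 0)).1.getD m 0 =
      ((PySem.List.pyRange 0 n 1).countP (fun j => pvCell xb (m : Int) j == "X") : Int) := by
    intro m hm
    rw [pvOuterB_rows n xb _ (PySem.List.nodup_pyRange_one 0 n)
      (fun i hi => (hl i hi).1) _ m (by simpa using hm)]
    have hmem : ((m : Int)) ∈ PySem.List.pyRange 0 n 1 := (hrmem _).mpr ⟨by omega, by omega⟩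
    rw [if_pos hmem]
    show (List.replicate n.toNat (0:Int)).getD m 0 + _ = _
    rw [pvRep_getD]
    ring
  have hcols : ∀ m : Nat, m < n.toNat →
      (pvOuterB n xb (PySem.List.pyRange 0 n 1)
        (List.replicate n.toNat 0, List.replicate n.toNat 0, 0, 0)).2.1.getD m 0 =
      ((PySem.List.pyRange 0 n 1).countP (fun i => pvCell xb i (m : Int) == "X") : Int) := by
    intro m hm
    rw [pvOuterB_cols n xb hn _ _ (by simp) m hm]
    show (List.replicate n.toNat (0:Int)).getD m 0 + _ = _
    rw [pvRep_getD]
    ring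
  have HA : ((pvOuterB n xb (PySem.List.pyRange 0 n 1)
      (List.replicate n.toNat 0, List.replicate n.toNat 0, 0, 0)).2.2.1 == n) = true ↔
      (∀ i ∈ PySem.List.pyRange 0 n 1, pvCell xb i i == "X") := by
    rw [beq_iff_eq, hdiag]
    exact hfull _
  have HB : ((pvOuterB n xb (PySem.List.pyRange 0 n 1)
      (List.replicate n.toNat 0, List.replicate n.toNat 0, 0, 0)).2.2.2 == n) = true ↔
      (∀ i ∈ PySem.List.pyRange 0 n 1, pvCell xb i (n - 1 - i) == "X") := by
    rw [beq_iff_eq, hanti]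
    exact hfull _
  have HC : ((pvOuterB n xb (PySem.List.pyRange 0 n 1)
      (List.replicate n.toNat 0, List.replicate n.toNat 0, 0, 0)).1.contains n) = true ↔
      (∃ i ∈ PySem.List.pyRange 0 n 1, ∀ j ∈ PySem.List.pyRange 0 n 1, pvCell xb i j == "X") := by
    rw [pvContains_iff]
    constructor
    · rintro ⟨m, hm, hv⟩
      rw [hlen1] at hm
      rw [hrows m hm] at hv
      exact ⟨(m : Int), (hrmem _).mpr ⟨by omega, by omega⟩, (hfull _).mp hv⟩
    · rintro ⟨i, hi, hall⟩
      rcases (hrmem i).mp hi with ⟨h0, h1⟩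
      refine ⟨i.toNat, by rw [hlen1]; omega, ?_⟩
      rw [hrows i.toNat (by omega)]
      have hcast : ((i.toNat : Int)) = i := Int.toNat_of_nonneg h0
      rw [hcast]
      exact (hfull _).mpr hall
  have HD : ((pvOuterB n xb (PySem.List.pyRange 0 n 1)
      (List.replicate n.toNat 0, List.replicate n.toNat 0, 0, 0)).2.1.contains n) = true ↔
      (∃ i ∈ PySem.List.pyRange 0 n 1, ∀ j ∈ PySem.List.pyRange 0 n 1, pvCell xb j i == "X") := by
    rw [pvContains_iff]
    constructor
    · rintro ⟨m, hm, hv⟩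
      rw [hlen2] at hm
      rw [hcols m hm] at hv
      exact ⟨(m : Int), (hrmem _).mpr ⟨by omega, by omega⟩, (hfull _).mp hv⟩
    · rintro ⟨i, hi, hall⟩
      rcases (hrmem i).mp hi with ⟨h0, h1⟩
      refine ⟨i.toNat, by rw [hlen2]; omega, ?_⟩
      rw [hcols i.toNat (by omega)]
      have hcast : ((i.toNat : Int)) = i := Int.toNat_of_nonneg h0
      rw [hcast]
      exact (hfull _).mpr hall
  rw [Bool.or_eq_true, Bool.or_eq_true, Bool.or_eq_true, HA, HB, HC, HD]
  exact or_assoc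

-- ===== VERDICT (by name: the statement is the Claim_ definition above) =====
theorem win_game_x_spec : Claim_equal_win_game_x := by
  intro n xb _ _
  unfold Spec_win_game_x
  by_cases hn : n < 1
  · have hr : PySem.List.pyRange 0 n 1 = [] := PySem.List.pyRange_one_eq_nil (by omega)
    unfold win_game_x win_game_x_alt
    rw [hr, if_pos hn]
    simp [pvDiagLoop, pvRowLoop, pvColLoop]
  · have hn2 : 0 < n := by omega
    rw [Bool.eq_iff_iff, win_game_x_true_iff n xb hn2, win_game_x_alt_true_iff n xb hn2]
    have harg : ∀ i : Int, n - (i + 1) = n - 1 - i := by intro i; ring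
    simp only [harg]
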